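-- pv_equiv track=rewrite | github.com/MarkParker5/STARK | stark/general/strings/find_substring_in_words.py | find_substring_in_words
-- ===== SOURCE A (Python) =====
-- def find_substring_in_words(substr: str, words: list[str]) -> list[list[int]]:
--
--     remaining = substr.strip()
--
--     to_return_candidates: list[int] = []
--     to_return: list[list[int]] = []
--
--     for i, word in enumerate(words):
--         if remaining in word:
--             remaining = ''
--             to_return_candidates.append(i)
--
--         elif interception := endswith_startof(word, remaining):
--             remaining = remaining[len(interception):].strip()
--             to_return_candidates.append(i)
--
--         elif word.startswith(remaining):
--             remaining = ''
--             to_return_candidates.append(i)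
--
--         else:
--             remaining = substr.strip()
--             to_return_candidates = []
--
--         if not remaining:
--             remaining = substr.strip()
--             to_return.append(to_return_candidates)
--             to_return_candidates = []
--
--     return to_return
--
-- def endswith_startof(s1: str, s2: str) -> str:
--     i, j = 0, 0
--     n1, n2 = len(s1), len(s2)
--
--     while i < n1:
--         j = 0
--         temp = ''
--         while j < n2 and i + j < n1:
--             if s1[i + j] != s2[j]:
--                 break
--             temp += s1[i + j]
--             j += 1
--
--         if j == n2:
--             return s2
--
--         if j > 0 and i + j == n1:
--             return temp
--
--         i += 1
--
--     return ''
-- ===== SOURCE B (Python) =====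
-- def find_substring_in_words(substr: str, words: list[str]) -> list[list[int]]:
--     base = substr.strip()
--     remaining = base
--     start = 0  # index where the current candidate run began
--     result: list[list[int]] = []
--     for i, word in enumerate(words):
--         if remaining in word:
--             remaining = ''
--         else:
--             k = _overlap(word, remaining)
--             if k:
--                 remaining = remaining[k:].strip()
--             else:
--                 remaining = base
--                 start = i + 1
--         if not remaining:
--             remaining = base
--             result.append(list(range(start, i + 1)))
--             start = i + 1
--     return result
--
-- def _overlap(word: str, remaining: str) -> int:
--     # largest k such that word ends with the first k characters of remaining
--     k = min(len(word), len(remaining))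
--     while k > 0 and not word.endswith(remaining[:k]):
--         k -= 1
--     return k
-- ===== Notes on version B (the rewrite author's own statement) =====
-- stated objective: simpler
-- what changed: B computes the word-suffix/substring-prefix overlap by a single descending endswith scan over prefix lengths instead of A's hand-rolled two-level alignment scan that rebuilds the match character by character, drops A's unreachable startswith branch, and tracks the candidate run by its start index, emitting list(range(start, i+1)) instead of accumulating an index list.
import Mathlib
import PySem

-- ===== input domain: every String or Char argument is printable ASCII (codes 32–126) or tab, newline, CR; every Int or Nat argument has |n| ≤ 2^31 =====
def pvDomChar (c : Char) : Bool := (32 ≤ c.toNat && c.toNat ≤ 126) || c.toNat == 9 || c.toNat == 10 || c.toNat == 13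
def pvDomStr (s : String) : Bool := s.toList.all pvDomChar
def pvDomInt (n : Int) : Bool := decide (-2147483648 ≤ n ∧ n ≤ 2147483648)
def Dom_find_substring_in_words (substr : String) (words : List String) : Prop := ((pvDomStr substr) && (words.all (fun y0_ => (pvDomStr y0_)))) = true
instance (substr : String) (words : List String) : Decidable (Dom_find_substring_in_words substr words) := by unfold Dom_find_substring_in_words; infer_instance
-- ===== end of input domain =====

-- B replaces A's hand-rolled alignment scan (endswith_startof) by a direct descending
-- endswith search for the longest word-suffix/substring-prefix overlap, drops A's
-- unreachable startswith branch, and tracks the candidate run by its start index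
-- instead of accumulating an index list (objective: simpler; no speed claim).

-- ===== PORT A =====
-- inner while loop of endswith_startof: state (j, temp); the guard proves both indexings safe
def pvInnerA (s1 s2 : List Char) (i j : Nat) (temp : List Char) : Nat × List Char :=
  if h : j < s2.length ∧ i + j < s1.length then
    if s1[i + j]'h.2 = s2[j]'h.1 then
      pvInnerA s1 s2 i (j + 1) (temp ++ [s1[i + j]'h.2])
    else (j, temp)
  else (j, temp)
termination_by s2.length - j

-- outer while loop of endswith_startof (at List Char level; the Python helper returns a str)
def pvOuterA (s1 s2 : List Char) (i : Nat) : List Char :=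
  if _h : i < s1.length then
    let r := pvInnerA s1 s2 i 0 []
    if r.1 = s2.length then s2
    else if 0 < r.1 ∧ i + r.1 = s1.length then r.2
    else pvOuterA s1 s2 (i + 1)
  else []
termination_by s1.length - i

-- one iteration of A's for-loop; state (remaining, to_return_candidates, to_return)
def pvStepA (substrBase : List Char) (st : List Char × List Int × List (List Int))
    (iw : Int × String) : List Char × List Int × List (List Int) :=
  let rem := st.1; let cand := st.2.1; let out := st.2.2
  let w := iw.2.toList
  let rc :=
    (if PySem.Chars.isIn rem w then (([] : List Char), cand ++ [iw.1])
     else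
       let interception := pvOuterA w rem 0
       if interception ≠ [] then
         (PySem.Chars.strip (rem.drop interception.length), cand ++ [iw.1])
       else if PySem.Chars.startswith w rem then (([] : List Char), cand ++ [iw.1])
       else (substrBase, ([] : List Int)))
  if rc.1 = [] then (substrBase, [], out ++ [rc.2]) else (rc.1, rc.2, out)

def find_substring_in_words (substr : String) (words : List String) : List (List Int) :=
  let base := PySem.Chars.strip substr.toList
  ((PySem.List.enumerate words 0).foldl (pvStepA base) (base, [], [])).2.2

-- ===== PORT B =====
-- _overlap's while loop: largest k ≤ start value with word.endswith(remaining[:k])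
def pvOverlapB (w rem : List Char) (k : Nat) : Nat :=
  if 0 < k ∧ ¬ PySem.Chars.endswith w (rem.take k) then pvOverlapB w rem (k - 1) else k
termination_by k

-- one iteration of B's for-loop; state (remaining, start, result)
def pvStepB (substrBase : List Char) (st : List Char × Int × List (List Int))
    (iw : Int × String) : List Char × Int × List (List Int) :=
  let rem := st.1; let start := st.2.1; let out := st.2.2
  let w := iw.2.toList
  let rs :=
    (if PySem.Chars.isIn rem w then (([] : List Char), start)
     else
       let k := pvOverlapB w rem (min w.length rem.length)
       if k ≠ 0 then (PySem.Chars.strip (rem.drop k), start)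
       else (substrBase, iw.1 + 1))
  if rs.1 = [] then (substrBase, iw.1 + 1, out ++ [PySem.List.pyRange rs.2 (iw.1 + 1) 1])
  else (rs.1, rs.2, out)

def find_substring_in_words_alt (substr : String) (words : List String) : List (List Int) :=
  let base := PySem.Chars.strip substr.toList
  ((PySem.List.enumerate words 0).foldl (pvStepB base) (base, 0, [])).2.2

-- ===== PRECONDITION & SPEC =====
def Spec_find_substring_in_words (substr : String) (words : List String) (out : List (List Int)) : Prop := out = find_substring_in_words_alt substr words
instance (substr : String) (words : List String) (out : List (List Int)) : Decidable (Spec_find_substring_in_words substr words out) := by unfold Spec_find_substring_in_words; infer_instance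

-- ===== CLAIM (what is proved, stated in full; the proofs are below) =====
def Claim_equal_find_substring_in_words : Prop := ∀ (substr : String) (words : List String), Dom_find_substring_in_words substr words → Spec_find_substring_in_words substr words (find_substring_in_words substr words)

-- ===== LEMMAS AND PROOFS =====

-- longest common prefix length of two lists
def pvMlen : List Char → List Char → Nat
  | x :: xs, y :: ys => if x = y then pvMlen xs ys + 1 else 0
  | _, _ => 0

-- largest k ≤ bound such that rem.take k is a suffix of w (0 if none)
def pvBest (w rem : List Char) : Nat → Nat
  | 0 => 0
  | k + 1 => if rem.take (k + 1) <:+ w then k + 1 else pvBest w rem k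


theorem pvMlen_nil_right (a : List Char) : pvMlen a [] = 0 := by cases a <;> rfl

theorem pvMlen_eq_left_iff (a b : List Char) : pvMlen a b = a.length ↔ a <+: b := by
  induction a generalizing b with
  | nil => simp [pvMlen]
  | cons x xs ih =>
    cases b with
    | nil =>
      simp only [pvMlen_nil_right, List.length_cons]
      constructor
      · omega
      · intro h; exact absurd (h.length_le) (by simp)
    | cons y ys =>
      by_cases h : x = y
      · subst h; simp [pvMlen, List.cons_prefix_cons, ih]
      · simp [pvMlen, h, List.cons_prefix_cons]

theorem pvMlen_eq_right_iff (a b : List Char) : pvMlen a b = b.length ↔ b <+: a := by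
  induction a generalizing b with
  | nil =>
    cases b with
    | nil => simp [pvMlen]
    | cons y ys =>
      simp only [pvMlen, List.length_cons]
      constructor
      · omega
      · intro h; exact absurd h.length_le (by simp)
  | cons x xs ih =>
    cases b with
    | nil => simp [pvMlen_nil_right]
    | cons y ys =>
      by_cases h : x = y
      · subst h; simp [pvMlen, List.cons_prefix_cons, ih]
      · simp [pvMlen, h, List.cons_prefix_cons]
        intro hh _; exact h hh.symm

theorem pvInnerA_spec (s1 s2 : List Char) (i j : Nat) (temp : List Char) :
    pvInnerA s1 s2 i j temp =
      (j + pvMlen (s1.drop (i + j)) (s2.drop j),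
       temp ++ (s2.drop j).take (pvMlen (s1.drop (i + j)) (s2.drop j))) := by
  fun_induction pvInnerA s1 s2 i j temp with
  | case1 j temp h heq ih =>
    rw [ih]
    rw [List.drop_eq_getElem_cons h.2, List.drop_eq_getElem_cons h.1]
    simp only [pvMlen, if_pos heq]
    simp only [← Nat.add_assoc, List.take_succ_cons, Prod.mk.injEq]
    refine ⟨by omega, ?_⟩
    simp [heq, List.append_assoc]
  | case2 j temp h heq =>
    rw [List.drop_eq_getElem_cons h.2, List.drop_eq_getElem_cons h.1]
    simp [pvMlen, heq]
  | case3 j temp h =>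
    rcases Nat.lt_or_ge j s2.length with h2 | h2
    · have h1 : s1.length ≤ i + j := by omega
      rw [List.drop_eq_nil_of_le h1]
      simp [pvMlen]
    · rw [List.drop_eq_nil_of_le h2, pvMlen_nil_right]
      simp

theorem pvBest_le (w rem : List Char) (k : Nat) : pvBest w rem k ≤ k := by
  induction k with
  | zero => simp [pvBest]
  | succ k ih =>
    simp only [pvBest]
    split_ifs with h
    · exact le_rfl
    · exact ih.trans (by omega)

theorem pvBest_high (w rem : List Char) (h : ¬ rem <:+: w) (k : Nat) (hk : rem.length ≤ k) :
    pvBest w rem k = pvBest w rem rem.length := by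
  induction k with
  | zero => rw [Nat.le_zero.mp hk]
  | succ k ih =>
    rcases Nat.lt_or_ge rem.length (k + 1) with h2 | h2
    · have hle : rem.length ≤ k := by omega
      simp only [pvBest]
      rw [if_neg, ih hle]
      rw [List.take_of_length_le (by omega)]
      exact fun hs => h hs.isInfix
    · have : rem.length = k + 1 := by omega
      rw [this]

theorem pvOverlapB_eq_pvBest (w rem : List Char) (k : Nat) :
    pvOverlapB w rem k = pvBest w rem k := by
  induction k with
  | zero => simp [pvOverlapB, pvBest]
  | succ k ih =>
    rw [pvOverlapB]
    by_cases hs : rem.take (k + 1) <:+ w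
    · rw [if_neg, pvBest, if_pos hs]
      simp [PySem.Chars.endswith_iff, hs]
    · rw [if_pos, pvBest, if_neg hs]
      · simpa using ih
      · simp [PySem.Chars.endswith_iff, hs]

theorem pvBest_start_eq (w rem : List Char) (h : ¬ rem <:+: w) :
    pvBest w rem w.length = pvBest w rem (min w.length rem.length) := by
  rcases le_total rem.length w.length with hle | hle
  · rw [pvBest_high w rem h w.length hle, Nat.min_eq_right hle]
  · rw [Nat.min_eq_left hle]

theorem pvOuterA_spec (s1 s2 : List Char) (h : ¬ s2 <:+: s1) (i : Nat) :
    pvOuterA s1 s2 i = s2.take (pvBest s1 s2 (s1.length - i)) := by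
  fun_induction pvOuterA s1 s2 i with
  | case1 i hi hr heq =>
    exfalso
    have hre : hr.1 = pvMlen (s1.drop i) s2 := by
      show (pvInnerA s1 s2 i 0 []).1 = _
      rw [pvInnerA_spec]; simp
    rw [hre] at heq
    exact h (((pvMlen_eq_right_iff _ _).mp heq).isInfix.trans (List.drop_suffix i s1).isInfix)
  | case2 i hi hr hne hcond =>
    have hre1 : hr.1 = pvMlen (s1.drop i) s2 := by
      show (pvInnerA s1 s2 i 0 []).1 = _
      rw [pvInnerA_spec]; simp
    have hre2 : hr.2 = s2.take (pvMlen (s1.drop i) s2) := by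
      show (pvInnerA s1 s2 i 0 []).2 = _
      rw [pvInnerA_spec]; simp
    rw [hre1] at hcond
    have hm : pvMlen (s1.drop i) s2 = s1.length - i := by omega
    have hpre : s1.drop i <+: s2 := by
      rw [← pvMlen_eq_left_iff]
      rw [hm, List.length_drop]
    have htake : s2.take (s1.length - i) = s1.drop i := by
      have := List.prefix_iff_eq_take.mp hpre
      rw [List.length_drop] at this
      exact this.symm
    obtain ⟨t, ht⟩ : ∃ t, s1.length - i = t + 1 := ⟨s1.length - i - 1, by omega⟩
    have hguard : s2.take (t + 1) <:+ s1 := by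
      rw [← ht, htake]; exact List.drop_suffix i s1
    rw [ht, pvBest, if_pos hguard, ← ht, htake, hre2, hm, htake]
  | case3 i hi hr hne hcond ih =>
    rw [ih]
    have hre1 : hr.1 = pvMlen (s1.drop i) s2 := by
      show (pvInnerA s1 s2 i 0 []).1 = _
      rw [pvInnerA_spec]; simp
    obtain ⟨t, ht⟩ : ∃ t, s1.length - i = t + 1 := ⟨s1.length - i - 1, by omega⟩
    have hguard : ¬ (s2.take (t + 1) <:+ s1) := by
      intro hs
      rcases Nat.lt_or_ge s2.length (t + 2) with h2 | h2
      · -- s2.length ≤ t+1 : take = s2, so s2 suffix of s1, contra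
        rw [List.take_of_length_le (by omega)] at hs
        exact h hs.isInfix
      · -- t+1 < s2.length
        have hlen : (s2.take (t + 1)).length = t + 1 := by
          rw [List.length_take]; omega
        have := List.suffix_iff_eq_drop.mp hs
        rw [hlen] at this
        have hdrop : s1.drop i = s2.take (t + 1) := by
          rw [this]; congr 1; omega
        have hml : pvMlen (s1.drop i) s2 = (s1.drop i).length := by
          rw [pvMlen_eq_left_iff, hdrop]; exact List.take_prefix _ _
        have : pvMlen (s1.drop i) s2 = s1.length - i := by
          rw [hml, List.length_drop]
        exact hcond ⟨by omega, by omega⟩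
    rw [ht, pvBest, if_neg hguard]
    congr 2
    omega
  | case4 i hi =>
    have : s1.length - i = 0 := by omega
    rw [this]
    simp [pvBest]

theorem pvStep_eq (base rem : List Char) (out : List (List Int))
    (start i : Int) (w : String) (hs : start ≤ i) :
    pvStepA base (rem, PySem.List.pyRange start i 1, out) (i, w) =
      ((pvStepB base (rem, start, out) (i, w)).1,
       PySem.List.pyRange (pvStepB base (rem, start, out) (i, w)).2.1 (i + 1) 1,
       (pvStepB base (rem, start, out) (i, w)).2.2) ∧
    (pvStepB base (rem, start, out) (i, w)).2.1 ≤ i + 1 := by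
  have hsucc : PySem.List.pyRange start i 1 ++ [i] = PySem.List.pyRange start (i + 1) 1 :=
    (PySem.List.pyRange_one_succ_right hs).symm
  have hnil : PySem.List.pyRange (i + 1) (i + 1) 1 = [] :=
    PySem.List.pyRange_one_eq_nil le_rfl
  simp only [pvStepA, pvStepB]
  by_cases hin : PySem.Chars.isIn rem w.toList
  · simp [hin, hsucc, hnil]
  · have hrem : rem ≠ [] := by
      rintro rfl; simp [PySem.Chars.isIn_nil] at hin
    have hinf : ¬ rem <:+: w.toList := by
      rw [← PySem.Chars.isIn_iff_infix]; exact hin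
    have hA : pvOuterA w.toList rem 0 =
        rem.take (pvOverlapB w.toList rem (min w.toList.length rem.length)) := by
      rw [pvOuterA_spec _ _ hinf 0, pvOverlapB_eq_pvBest, Nat.sub_zero,
        pvBest_start_eq _ _ hinf]
    set k := pvOverlapB w.toList rem (min w.toList.length rem.length) with hk
    have hkr : k ≤ rem.length := by
      rw [hk, pvOverlapB_eq_pvBest]
      exact (pvBest_le _ _ _).trans (Nat.min_le_right _ _)
    by_cases hk0 : k = 0
    · have hiA : pvOuterA w.toList rem 0 = [] := by rw [hA, hk0, List.take_zero]
      have hsw : ¬ PySem.Chars.startswith w.toList rem := by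
        rw [PySem.Chars.startswith_iff]
        exact fun hp => hinf hp.isInfix
      simp only [hin, hiA, hk0]
      by_cases hb : base = []
      · simp [hb, hsw, hnil]
      · simp [hb, hsw, hnil]
    · have hiA : pvOuterA w.toList rem 0 = rem.take k := hA
      have hne : rem.take k ≠ [] := by
        intro hh
        rcases List.take_eq_nil_iff.mp hh with h1 | h1
        · exact hk0 h1
        · exact hrem h1
      have hlen : (rem.take k).length = k := by
        rw [List.length_take, Nat.min_eq_left hkr]
      simp only [hin, hiA, hlen]
      by_cases hstrip : PySem.Chars.strip (rem.drop k) = []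
      · simp [hstrip, hsucc, hnil, hk0, hrem]
      · simp [hstrip, hsucc, hk0, hrem, hs.trans (show i ≤ i + 1 by omega)]

theorem pvFold_eq (base : List Char) (ws : List String) (i : Int) (rem : List Char)
    (cand : List Int) (start : Int) (out : List (List Int)) (hs : start ≤ i)
    (hc : cand = PySem.List.pyRange start i 1) :
    ((PySem.List.enumerate ws i).foldl (pvStepA base) (rem, cand, out)).2.2 =
    ((PySem.List.enumerate ws i).foldl (pvStepB base) (rem, start, out)).2.2 := by
  subst hc
  induction ws generalizing i rem start out with
  | nil => simp [PySem.List.enumerate_nil]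
  | cons w ws ih =>
    rw [PySem.List.enumerate_cons, List.foldl_cons, List.foldl_cons]
    obtain ⟨hstep, hle⟩ := pvStep_eq base rem out start i w hs
    rw [hstep]
    exact ih (i + 1) _ _ _ hle

-- ===== VERDICT (by name: the statement is the Claim_ definition above) =====
theorem find_substring_in_words_spec : Claim_equal_find_substring_in_words := by
  intro substr words _
  unfold Spec_find_substring_in_words find_substring_in_words find_substring_in_words_alt
  show ((PySem.List.enumerate words 0).foldl (pvStepA (PySem.Chars.strip substr.toList))
      (PySem.Chars.strip substr.toList, [], [])).2.2 =
    ((PySem.List.enumerate words 0).foldl (pvStepB (PySem.Chars.strip substr.toList))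
      (PySem.Chars.strip substr.toList, 0, [])).2.2
  exact pvFold_eq (PySem.Chars.strip substr.toList) words 0 (PySem.Chars.strip substr.toList)
    [] 0 [] le_rfl (by simp [PySem.List.pyRange])
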